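-- pv_equiv track=rewrite | github.com/dmsgk/Prob-Solving | programmers/string/Lv1_직업군추천하기.py | solution
-- ===== SOURCE A (Python) =====
-- def solution(table, languages, preference):
--     pref_dict = dict()
--     for i in range(len(languages)):
--         pref_dict[languages[i]] = preference[i]
--
--     num_li = []
--     for row in table:
--         num = 0
--         row_li = row.split()
--         work_part = row_li.pop(0)
--         for lan in languages:
--             if lan not in row_li:
--                 continue
--             score = 5 - row_li.index(lan)
--             num += score * pref_dict[lan]
--         num_li.append([work_part, num])
--
--     num_li.sort(key= lambda x : (-x[1], x[0]))
--     max_num = num_li.pop(0)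
--     return max_num[0]
-- ===== SOURCE B (Python) =====
-- def solution(table, languages, preference):
--     pref = dict(zip(languages, preference))
--     best = None
--     for row in table:
--         toks = row.split()
--         work, rest = toks[0], toks[1:]
--         pos = {}
--         for i, tok in enumerate(rest):
--             pos.setdefault(tok, i)
--         num = sum((5 - pos[lan]) * pref[lan] for lan in languages if lan in pos)
--         if best is None or num > best[1] or (num == best[1] and work < best[0]):
--             best = (work, num)
--     return best[0]
-- ===== Notes on version B (the rewrite author's own statement) =====
-- stated objective: alternative
-- what changed: Replaces the sort-then-pop(0) selection by a single linear best-tracking pass under the same (-score, name) key, and replaces the per-language 'in'/'.index' inner scans over each row by a first-occurrence position dict built once per row with setdefault; it trades A's repeated C-level list scans for one per-row tokenwise pass, so it is not measurably faster when there are few languages.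
import Mathlib
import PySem

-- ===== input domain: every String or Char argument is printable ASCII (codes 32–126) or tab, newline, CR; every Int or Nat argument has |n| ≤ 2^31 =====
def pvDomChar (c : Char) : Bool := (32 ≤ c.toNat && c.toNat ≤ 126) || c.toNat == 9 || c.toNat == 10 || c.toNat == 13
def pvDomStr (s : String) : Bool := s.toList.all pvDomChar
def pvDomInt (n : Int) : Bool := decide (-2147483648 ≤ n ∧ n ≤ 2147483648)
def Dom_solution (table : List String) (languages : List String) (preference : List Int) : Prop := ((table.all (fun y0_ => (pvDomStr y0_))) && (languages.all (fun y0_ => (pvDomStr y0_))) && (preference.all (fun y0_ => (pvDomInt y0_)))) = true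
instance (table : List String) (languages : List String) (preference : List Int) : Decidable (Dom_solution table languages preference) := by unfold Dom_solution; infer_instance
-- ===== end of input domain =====

-- B replaces A's sort-then-pop(0) by a single linear best-tracking pass under the same
-- (-score, name) key, and replaces the repeated 'in'/'.index' inner scans over each row by a
-- first-occurrence position dict built once per row (an alternative algorithm, not claimed faster).

-- ===== PORT A =====
def solution (table : List String) (languages : List String) (preference : List Int) : String :=
  -- pref_dict[languages[i]] = preference[i] for i in range(len(languages))
  let prefDict := (PySem.List.pyRange 0 (PySem.List.len languages)).foldl
      (fun d i => d.insert (PySem.List.pyGetD languages i "") (PySem.List.pyGetD preference i 0))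
      PySem.Dict.empty
  let numLi := table.foldl (fun acc row =>
      let rowLi := PySem.Str.split₀ row
      -- work_part = row_li.pop(0)  (raises IndexError on an empty split; excluded by Pre_)
      let p := (PySem.List.pop? rowLi 0).getD ("", [])
      let num := languages.foldl (fun num lan =>
          if lan ∈ p.2 then
            num + (5 - (((PySem.List.index? p.2 lan).getD 0 : Nat) : Int)) * prefDict.getD lan 0
          else num) 0
      acc ++ [(p.1, num)]) []
  let sortedLi := PySem.List.sorted2 numLi (fun x => -x.2) (fun x => x.1)
  -- max_num = num_li.pop(0)  (raises IndexError on an empty table; excluded by Pre_)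
  let maxNum := (PySem.List.pop? sortedLi 0).getD (("", 0), [])
  maxNum.1.1

-- ===== PORT B =====
def solution_alt (table : List String) (languages : List String) (preference : List Int) : String :=
  let pref := PySem.Dict.ofList (languages.zip preference)
  let best := table.foldl (fun best row =>
      let toks := PySem.Str.split₀ row
      let work := PySem.List.pyGetD toks 0 ""
      let rest := PySem.List.slice toks (some 1) none
      let pos := (PySem.List.enumerate rest).foldl (fun d p => d.setdefault p.2 p.1) PySem.Dict.empty
      let num := ((languages.filter (fun lan => pos.contains lan)).map
          (fun lan => (5 - pos.getD lan 0) * pref.getD lan 0)).sum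
      match best with
      | none => some (work, num)
      | some b => if b.2 < num || (num == b.2 && decide (work < b.1)) then some (work, num) else some b)
      (none : Option (String × Int))
  match best with
  | some b => b.1
  | none => ""

-- ===== PRECONDITION & SPEC =====
-- Pre_ excludes exactly the inputs where A raises IndexError: an empty table (num_li.pop(0)),
-- a row whose split() is empty (row_li.pop(0)), and preference shorter than languages (preference[i]).
def Pre_solution (table : List String) (languages : List String) (preference : List Int) : Prop :=
  table ≠ [] ∧ languages.length ≤ preference.length ∧ ∀ row ∈ table, PySem.Str.split₀ row ≠ []
instance (table : List String) (languages : List String) (preference : List Int) : Decidable (Pre_solution table languages preference) := by unfold Pre_solution; infer_instance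
def pvWitness_solution : List String × List String × List Int :=
  (["SI java python", "CONTENTS ruby java"], ["java", "python"], [3, 4])

def Spec_solution (table : List String) (languages : List String) (preference : List Int) (out : String) : Prop := out = solution_alt table languages preference
instance (table : List String) (languages : List String) (preference : List Int) (out : String) : Decidable (Spec_solution table languages preference out) := by unfold Spec_solution; infer_instance

-- ===== CLAIM (what is proved, stated in full; the proofs are below) =====
def Claim_equal_solution : Prop := ∀ (table : List String) (languages : List String) (preference : List Int), Dom_solution table languages preference → Pre_solution table languages preference → Spec_solution table languages preference (solution table languages preference)

-- ===== LEMMAS AND PROOFS =====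

-- The dict built by 'for i in range(len(languages)): d[languages[i]] = preference[i]'
-- is the dict built from the zipped pairs (when preference is at least as long).
theorem rangeInsert_eq_update (langs : List String) (prefs : List Int)
    (h : langs.length ≤ prefs.length) (d : PySem.Dict String Int) :
    (List.range langs.length).foldl
      (fun d i => d.insert (langs.getD i "") (prefs.getD i 0)) d
    = d.update (langs.zip prefs) := by
  induction langs generalizing prefs d with
  | nil => simp [PySem.Dict.update]
  | cons x xs ih =>
    cases prefs with
    | nil => simp at h
    | cons y ys =>
      simp only [List.length_cons, List.range_succ_eq_map, List.foldl_cons, List.foldl_map,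
        List.getD_cons_zero, List.getD_cons_succ, List.zip_cons_cons]
      rw [ih ys (by simpa using h)]
      rfl

-- get? of the setdefault fold over enumerate: first match in d, else first index in the list.
theorem posFold_get? (rest : List String) (v : String) :
    ∀ (s : Int) (d : PySem.Dict String Int),
    ((PySem.List.enumerate rest s).foldl (fun d p => d.setdefault p.2 p.1) d).get? v
    = (d.get? v).or ((PySem.List.index? rest v).map (fun k => s + (k : Int))) := by
  induction rest with
  | nil => intro s d; simp [PySem.List.enumerate_nil, PySem.List.index?_eq_idxOf?]
  | cons x rest ih =>
    intro s d
    rw [PySem.List.enumerate_cons, List.foldl_cons, ih]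
    by_cases hv : v = x
    · subst hv
      rw [PySem.Dict.get?_setdefault_self, PySem.List.index?_cons_self]
      cases d.get? v with
      | none => simp
      | some w => simp
    · rw [PySem.Dict.get?_setdefault_of_ne _ _ hv,
        PySem.List.index?_cons_of_ne _ (Ne.symm hv)]
      cases d.get? v with
      | none =>
          cases PySem.List.index? rest v with
          | none => simp
          | some k => simp; ring
      | some w => simp

-- a fold 'if p x then acc + f x else acc' is the sum over the filtered list
theorem foldl_if_add_eq_sum_filter {α : Type} (l : List α) (p : α → Bool) (f : α → Int) :
    ∀ (a : Int), l.foldl (fun acc x => if p x then acc + f x else acc) a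
      = a + ((l.filter p).map f).sum := by
  induction l with
  | nil => intro a; simp
  | cons x xs ih =>
    intro a
    by_cases hp : p x <;> simp [List.foldl_cons, hp, ih, add_assoc]

-- head of an insertBy fold: the linear scan keeping the current head unless 'before'
theorem head_foldl_insertBy {α : Type} (before : α → α → Bool) (xs : List α) :
    ∀ (acc : List α) (_ : acc ≠ []) (dflt : α),
    ((xs.foldl (fun acc x => PySem.List.insertBy before x acc) acc).headD dflt)
    = xs.foldl (fun b x => if before x b then x else b) (acc.headD dflt) := by
  induction xs with
  | nil => intro acc h d; rfl
  | cons x xs ih =>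
    intro acc h d
    cases acc with
    | nil => exact absurd rfl h
    | cons y t =>
      rw [List.foldl_cons, List.foldl_cons]
      have hins : PySem.List.insertBy before x (y :: t)
          = if before x y then x :: y :: t else y :: PySem.List.insertBy before x t := rfl
      rw [hins]
      by_cases hb : before x y
      · rw [if_pos hb, ih _ (by simp)]
        simp [hb]
      · rw [if_neg hb, ih _ (by simp)]
        simp [hb]

-- proof-side names for the two fold bodies (definitionally the ports' bodies)
def prefD (languages : List String) (preference : List Int) : PySem.Dict String Int :=
  (PySem.List.pyRange 0 (PySem.List.len languages)).foldl
    (fun d i => d.insert (PySem.List.pyGetD languages i "") (PySem.List.pyGetD preference i 0))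
    PySem.Dict.empty

def numA (P : PySem.Dict String Int) (languages : List String) (rest : List String) : Int :=
  languages.foldl (fun num lan =>
    if lan ∈ rest then
      num + (5 - (((PySem.List.index? rest lan).getD 0 : Nat) : Int)) * P.getD lan 0
    else num) 0

def fA (P : PySem.Dict String Int) (languages : List String) (row : String) : String × Int :=
  let p := (PySem.List.pop? (PySem.Str.split₀ row) 0).getD ("", [])
  (p.1, numA P languages p.2)

def posB (rest : List String) : PySem.Dict String Int :=
  (PySem.List.enumerate rest).foldl (fun d p => d.setdefault p.2 p.1) PySem.Dict.empty

def fB (P : PySem.Dict String Int) (languages : List String) (row : String) : String × Int :=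
  let toks := PySem.Str.split₀ row
  let rest := PySem.List.slice toks (some 1) none
  (PySem.List.pyGetD toks 0 "",
   ((languages.filter (fun lan => (posB rest).contains lan)).map
      (fun lan => (5 - (posB rest).getD lan 0) * P.getD lan 0)).sum)

def condB (b x : String × Int) : Bool := b.2 < x.2 || (x.2 == b.2 && decide (x.1 < b.1))

def ltA (a b : String × Int) : Bool :=
  decide ((-a.2 : Int) < -b.2) || (!decide ((-b.2 : Int) < -a.2) && decide (a.1 < b.1))

theorem solution_unfold (t : List String) (l : List String) (p : List Int) :
    solution t l p
    = ((PySem.List.pop? (PySem.List.sorted2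
          (t.foldl (fun acc row => acc ++ [fA (prefD l p) l row]) [])
          (fun x => -x.2) (fun x => x.1)) 0).getD (("", 0), [])).1.1 := rfl

theorem alt_unfold (t : List String) (l : List String) (p : List Int) :
    solution_alt t l p
    = (match t.foldl (fun best row =>
        match best with
        | none => some (fB (PySem.Dict.ofList (l.zip p)) l row)
        | some b => if condB b (fB (PySem.Dict.ofList (l.zip p)) l row)
                    then some (fB (PySem.Dict.ofList (l.zip p)) l row) else some b)
        (none : Option (String × Int)) with
       | some b => b.1
       | none => "") := rfl

theorem prefD_eq (l : List String) (p : List Int) (h : l.length ≤ p.length) :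
    prefD l p = PySem.Dict.ofList (l.zip p) := by
  unfold prefD
  have : PySem.List.len l = ((l.length : Nat) : Int) := rfl
  rw [this, PySem.List.pyRange_zero_nat, List.foldl_map]
  simp only [PySem.List.pyGetD_natCast]
  rw [rangeInsert_eq_update l p h]
  rfl

theorem posB_get? (rest : List String) (v : String) :
    (posB rest).get? v = (PySem.List.index? rest v).map (fun k => (k : Int)) := by
  unfold posB
  rw [posFold_get? rest v 0 PySem.Dict.empty]
  have hemp : (PySem.Dict.empty : PySem.Dict String Int).get? v = none := rfl
  rw [hemp]
  cases PySem.List.index? rest v with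
  | none => rfl
  | some k => simp

theorem posB_contains (rest : List String) (v : String) :
    (posB rest).contains v = decide (v ∈ rest) := by
  cases hidx : PySem.List.index? rest v with
  | none =>
      have hnm : v ∉ rest := (PySem.List.index?_eq_none_iff rest v).mp hidx
      have : (posB rest).get? v = none := by rw [posB_get?, hidx]; rfl
      rw [(PySem.Dict.get?_eq_none_iff_contains _ _).mp this]
      simp [hnm]
  | some k =>
      have hm : v ∈ rest := by
        have : (PySem.List.index? rest v).isSome := by rw [hidx]; rfl
        exact (PySem.List.index?_isSome_iff rest v).mp this
      have hg : (posB rest).get? v = some (k : Int) := by rw [posB_get?, hidx]; rfl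
      cases hcc : (posB rest).contains v with
      | true => simp [hm]
      | false =>
          rw [(PySem.Dict.get?_eq_none_iff_contains _ _).mpr hcc] at hg
          simp at hg

theorem numA_eq_numB (P : PySem.Dict String Int) (l rest : List String) :
    numA P l rest
    = ((l.filter (fun lan => (posB rest).contains lan)).map
        (fun lan => (5 - (posB rest).getD lan 0) * P.getD lan 0)).sum := by
  unfold numA
  rw [PySem.List.foldl_congr_mem _ _
      (fun num lan => if (posB rest).contains lan
        then num + (5 - (posB rest).getD lan 0) * P.getD lan 0 else num) 0 ?_]
  · rw [foldl_if_add_eq_sum_filter, zero_add]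
  · intro acc lan _
    beta_reduce
    by_cases hm : lan ∈ rest
    · obtain ⟨k, hk⟩ : ∃ k, PySem.List.index? rest lan = some k := by
        have := (PySem.List.index?_isSome_iff rest lan).mpr hm
        exact Option.isSome_iff_exists.mp this
      have hgd : (posB rest).getD lan 0 = (k : Int) :=
        PySem.Dict.getD_of_get?_eq_some _ _ (by rw [posB_get?, hk]; rfl)
      rw [if_pos hm, if_pos (by rw [posB_contains]; simp [hm]), hgd, hk]
      rfl
    · rw [if_neg hm, if_neg (by rw [posB_contains]; simp [hm])]

theorem fA_eq_fB (P : PySem.Dict String Int) (l : List String) (row : String)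
    (h : PySem.Str.split₀ row ≠ []) : fA P l row = fB P l row := by
  cases hrow : PySem.Str.split₀ row with
  | nil => exact absurd hrow h
  | cons w rest =>
      unfold fA fB
      simp only [hrow, PySem.List.pop?_zero_cons, Option.getD_some,
        PySem.List.pyGetD_ofNat', List.getD_cons_zero]
      have hslice : PySem.List.slice (w :: rest) (some 1) none = rest := by
        simp [PySem.List.slice]
      rw [hslice]
      exact Prod.ext rfl (numA_eq_numB P l rest)

theorem condB_eq_ltA (x b : String × Int) : ltA x b = condB b x := by
  unfold ltA condB
  by_cases hlt : b.2 < x.2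
  · simp [show (-x.2 : Int) < -b.2 by omega, hlt]
  · have h1 : ¬((-x.2 : Int) < -b.2) := by omega
    by_cases heq : x.2 = b.2
    · simp [heq]
    · have h2 : (-b.2 : Int) < -x.2 := by omega
      simp [h1, hlt, heq, h2]

theorem pop0_getD_fst (l : List (String × Int)) :
    ((PySem.List.pop? l 0).getD (("", 0), [])).1 = l.headD ("", 0) := by
  cases l with
  | nil => rfl
  | cons x xs => rw [PySem.List.pop?_zero_cons]; rfl

-- Option-threaded best scan = plain scan once the accumulator is some
theorem foldl_option_best {α β : Type} (g : α → β) (c : β → β → Bool) (xs : List α) :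
    ∀ b : β, xs.foldl (fun o row =>
        o.elim (some (g row)) (fun b => if c b (g row) then some (g row) else some b)) (some b)
      = some (xs.foldl (fun b row => if c b (g row) then g row else b) b) := by
  induction xs with
  | nil => intro b; rfl
  | cons x xs ih =>
      intro b
      rw [List.foldl_cons, List.foldl_cons]
      by_cases hc : c b (g x)
      · simp only [Option.elim, hc, if_true]; exact ih _
      · simp only [Option.elim, hc]; exact ih _

theorem alt_scan (P : PySem.Dict String Int) (l : List String) (r : String) (rs : List String) :
    (r :: rs).foldl (fun best row =>
        match best with
        | none => some (fB P l row)
        | some b => if condB b (fB P l row) then some (fB P l row) else some b)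
      (none : Option (String × Int))
    = some (rs.foldl (fun b row => if condB b (fB P l row) then fB P l row else b) (fB P l r)) := by
  have hfun : (fun (best : Option (String × Int)) (row : String) =>
      match best with
      | none => some (fB P l row)
      | some b => if condB b (fB P l row) then some (fB P l row) else some b)
      = (fun best row => best.elim (some (fB P l row))
          (fun b => if condB b (fB P l row) then some (fB P l row) else some b)) := by
    funext o row; cases o <;> rfl
  rw [hfun, List.foldl_cons]
  exact foldl_option_best (fB P l) condB rs (fB P l r)

theorem main_eq (t : List String) (l : List String) (p : List Int)
    (hpre : Pre_solution t l p) : solution t l p = solution_alt t l p := by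
  obtain ⟨hne, hlen, hrows⟩ := hpre
  set P := PySem.Dict.ofList (l.zip p) with hPdef
  rw [solution_unfold, alt_unfold]
  rw [PySem.List.foldl_append_singleton_eq_map, List.nil_append]
  rw [prefD_eq l p hlen, ← hPdef]
  rw [List.map_congr_left (fun row hrow => fA_eq_fB P l row (hrows row hrow))]
  cases t with
  | nil => exact absurd rfl hne
  | cons r rs =>
      -- B side: option-threaded scan = plain scan from the first row
      rw [alt_scan P l r rs]
      -- A side: head of the insertBy fold = linear 'keep the earlier unless strictly before' scan
      have hsorted : PySem.List.sorted2 ((r :: rs).map (fB P l)) (fun x => -x.2) (fun x => x.1)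
          = (rs.map (fB P l)).foldl (fun acc x => PySem.List.insertBy ltA x acc) [fB P l r] := rfl
      rw [hsorted, pop0_getD_fst,
        head_foldl_insertBy ltA (rs.map (fB P l)) [fB P l r] (by simp) ("", 0)]
      rw [List.foldl_map]
      have hsc : rs.foldl (fun b y => if ltA (fB P l y) b then fB P l y else b) (fB P l r)
          = rs.foldl (fun b row => if condB b (fB P l row) then fB P l row else b) (fB P l r) :=
        PySem.List.foldl_congr_mem _ _ _ _
          (fun acc row _ => by rw [condB_eq_ltA])
      rw [List.headD_cons, hsc]

-- ===== VERDICT (by name: the statement is the Claim_ definition above) =====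
theorem solution_spec : Claim_equal_solution := by
  intro t l p _ hpre
  unfold Spec_solution
  exact main_eq t l p hpre
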